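-- pv_equiv track=rewrite | github.com/Gabriel9753/Advent-Of-Code-2022 | python_scripts/day_3.py | find_char_for_all_backpacks
-- ===== SOURCE A (Python) =====
-- def find_char_for_all_backpacks(group):
--     num_backpacks = len(group)
--     for _char in group[0]:
--         counter_other_backpacks = 0
--         for backpack in group[1:]:
--             if _char in backpack:
--                 counter_other_backpacks += 1
--         if counter_other_backpacks == num_backpacks - 1:
--             return _char
-- ===== SOURCE B (Python) =====
-- def find_char_for_all_backpacks(group):
--     candidates = list(group[0])
--     for backpack in group[1:]:
--         candidates = [c for c in candidates if c in backpack]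
--     if candidates:
--         return candidates[0]
-- ===== Notes on version B (the rewrite author's own statement) =====
-- stated objective: alternative
-- what changed: Transposes the traversal: instead of counting, per character of group[0], how many other backpacks contain it, B folds over the other backpacks once, filtering a shrinking candidate list, and returns the head of the surviving candidates.
import Mathlib
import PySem

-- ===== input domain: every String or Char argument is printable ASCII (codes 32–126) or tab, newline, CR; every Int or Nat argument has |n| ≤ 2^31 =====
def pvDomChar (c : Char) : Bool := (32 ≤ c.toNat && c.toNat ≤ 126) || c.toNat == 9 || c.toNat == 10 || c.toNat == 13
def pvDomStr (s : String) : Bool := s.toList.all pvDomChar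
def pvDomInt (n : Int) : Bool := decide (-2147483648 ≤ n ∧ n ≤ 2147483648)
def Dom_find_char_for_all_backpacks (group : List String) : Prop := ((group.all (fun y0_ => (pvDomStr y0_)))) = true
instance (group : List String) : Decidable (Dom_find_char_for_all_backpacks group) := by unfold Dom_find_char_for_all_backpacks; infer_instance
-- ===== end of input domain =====

-- B transposes the traversal: a single fold over the other backpacks filters a shrinking
-- candidate list of group[0]'s characters, then the head of the survivors is returned
-- (alternative decomposition; return value only, no mutation).

-- ===== PORT A =====
-- '_char in backpack': substring test of a 1-char string = character membership (exact here)
def pvCountA (c : Char) (rest : List String) : Int :=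
  rest.foldl (fun acc b => if b.toList.contains c then acc + 1 else acc) 0

def pvLoopA (num : Int) (rest : List String) : List Char → Option String
  | [] => none
  | c :: cs =>
      if pvCountA c rest = num - 1 then some (String.ofList [c]) else pvLoopA num rest cs

def find_char_for_all_backpacks (group : List String) : Option String :=
  match PySem.List.pyGet? group 0 with
  | none => none   -- group[0] raises IndexError; excluded by Pre_
  | some g0 => pvLoopA (group.length : Int) (PySem.List.slice group (some 1) none) g0.toList

-- ===== PORT B =====
def pvFilterB (rest : List String) (cands : List Char) : List Char :=
  rest.foldl (fun cs b => cs.filter (fun c => b.toList.contains c)) cands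

def find_char_for_all_backpacks_alt (group : List String) : Option String :=
  match PySem.List.pyGet? group 0 with
  | none => none   -- group[0] raises IndexError; excluded by Pre_
  | some g0 =>
      match pvFilterB (PySem.List.slice group (some 1) none) g0.toList with
      | [] => none
      | c :: _ => some (String.ofList [c])

-- ===== PRECONDITION & SPEC =====
-- group[0] raises IndexError on an empty group (in both A and B): exclude the empty list.
def Pre_find_char_for_all_backpacks (group : List String) : Prop := group ≠ []
instance (group : List String) : Decidable (Pre_find_char_for_all_backpacks group) := by
  unfold Pre_find_char_for_all_backpacks; infer_instance

def pvWitness_find_char_for_all_backpacks : List String := ["vJrwpWtwJgWr", "hcsFMMfFFhFp"]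

def Spec_find_char_for_all_backpacks (group : List String) (out : Option String) : Prop := out = find_char_for_all_backpacks_alt group
instance (group : List String) (out : Option String) : Decidable (Spec_find_char_for_all_backpacks group out) := by unfold Spec_find_char_for_all_backpacks; infer_instance

-- ===== CLAIM (what is proved, stated in full; the proofs are below) =====
def Claim_equal_find_char_for_all_backpacks : Prop := ∀ (group : List String), Dom_find_char_for_all_backpacks group → Pre_find_char_for_all_backpacks group → Spec_find_char_for_all_backpacks group (find_char_for_all_backpacks group)

-- ===== LEMMAS AND PROOFS =====

-- A's counter reaches num_backpacks - 1 exactly when every other backpack contains c.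
theorem pvCountA_eq_iff (c : Char) (rest : List String) :
    pvCountA c rest = (rest.length : Int) ↔ ∀ b ∈ rest, c ∈ b.toList := by
  unfold pvCountA
  rw [PySem.List.foldl_count_if (fun b => b.toList.contains c) rest 0]
  constructor
  · intro h b hb
    have hlen : rest.countP (fun b => b.toList.contains c) = rest.length := by omega
    have := (List.countP_eq_length).1 hlen b hb
    simpa using this
  · intro h
    have : rest.countP (fun b => b.toList.contains c) = rest.length :=
      List.countP_eq_length.2 (fun b hb => by simpa using h b hb)
    omega

-- Folding a per-backpack filter equals one filter by the conjoined membership predicate.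
theorem pvFilterB_eq_filter (rest : List String) (cands : List Char) :
    pvFilterB rest cands
      = cands.filter (fun c => rest.all (fun b => b.toList.contains c)) := by
  unfold pvFilterB
  induction rest generalizing cands with
  | nil => simp
  | cons b bs ih =>
      simp only [List.foldl_cons]
      rw [ih, List.filter_filter]
      congr 1
      funext c
      simp [Bool.and_comm]

-- A's char-major scan returns the head of B's surviving candidates.
theorem pvLoopA_eq_head (rest : List String) (cs : List Char) :
    pvLoopA ((rest.length : Int) + 1) rest cs
      = (cs.filter (fun c => rest.all (fun b => b.toList.contains c))).head?.map
          (fun c => String.ofList [c]) := by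
  induction cs with
  | nil => rfl
  | cons c cs ih =>
      have hiff : (pvCountA c rest = (rest.length : Int) + 1 - 1)
          ↔ (rest.all (fun b => b.toList.contains c) = true) := by
        have h := pvCountA_eq_iff c rest
        simp only [List.all_eq_true, List.contains_iff_mem] at *
        constructor
        · intro hh; exact h.1 (by omega)
        · intro hh; have := h.2 hh; omega
      simp only [pvLoopA, List.filter_cons]
      by_cases h : rest.all (fun b => b.toList.contains c) = true
      · rw [if_pos (hiff.2 h), if_pos h]; rfl
      · rw [if_neg (fun hh => h (hiff.1 hh)), if_neg h]; exact ih

-- ===== VERDICT (by name: the statement is the Claim_ definition above) =====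
theorem find_char_for_all_backpacks_spec : Claim_equal_find_char_for_all_backpacks := by
  intro group _ hpre
  unfold Spec_find_char_for_all_backpacks
  match group with
  | [] => exact absurd rfl hpre
  | g0 :: rest =>
      unfold find_char_for_all_backpacks find_char_for_all_backpacks_alt
      have hget : PySem.List.pyGet? (g0 :: rest) 0 = some g0 := by
        simp [PySem.List.pyGet?, PySem.List.pyIdx?]
      rw [hget]
      have hslice : PySem.List.slice (g0 :: rest) (some 1) none = rest := by
        rw [PySem.List.slice_from (g0 :: rest) (by norm_num)]; rfl
      rw [hslice]
      dsimp only
      have hlen : ((g0 :: rest).length : Int) = (rest.length : Int) + 1 := by simp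
      rw [hlen, pvLoopA_eq_head, pvFilterB_eq_filter]
      cases (g0.toList.filter (fun c => rest.all (fun b => b.toList.contains c))) with
      | nil => rfl
      | cons c cs => rfl
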